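-- pv_equiv track=rewrite | github.com/zhangshi0512/Leetcode | Data Structure + Algorithm/03 HashTables/LC2260_MinimumConsecutiveCardsToPickUp.py | minimumCardPickup2
-- ===== SOURCE A (Python) =====
-- def minimumCardPickup2(cards):
--     # 初始化字典，key为卡的数值，value为该数值卡最后一次出现的位置
--     card_dict = {}
--     # 初始化最小连续卡片数为卡片总数+1
--     # 避免cards = [0,0]时的情况
--     minNum = len(cards)+1
--     for i, card in enumerate(cards):
--         # 如果这张卡已经出现过
--         if card in card_dict:
--             # 计算上次出现这张卡到这次出现这张卡之间的距离
--             distance = i - card_dict[card] + 1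
--             # 更新最小连续卡片数
--             minNum = min(minNum, distance)
--         # 更新这张卡的最后出现位置
--         card_dict[card] = i
--     # 如果遍历完所有卡后，最小连续卡片数仍为卡片总数+1，
--     # 说明没有一对匹配的卡，返回-1
--     if minNum == len(cards)+1:
--         return -1
--     else:
--         return minNum
-- ===== SOURCE B (Python) =====
-- def minimumCardPickup2(cards):
--     # Brute-force alternative: for each position, scan backwards for the
--     # nearest earlier equal card; keep the smallest window found (None if none).
--     best = None
--     for i, c in enumerate(cards):
--         j = i - 1
--         while j >= 0 and cards[j] != c:
--             j -= 1
--         if j >= 0: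
--             d = i - j + 1
--             if best is None or d < best:
--                 best = d
--     return -1 if best is None else best
-- ===== Notes on version B (the rewrite author's own statement) =====
-- stated objective: alternative
-- what changed: Replaces the dict of last-seen positions with a per-index backward scan for the nearest earlier equal card and an Option-style best accumulator (no dict at all).
import Mathlib
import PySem

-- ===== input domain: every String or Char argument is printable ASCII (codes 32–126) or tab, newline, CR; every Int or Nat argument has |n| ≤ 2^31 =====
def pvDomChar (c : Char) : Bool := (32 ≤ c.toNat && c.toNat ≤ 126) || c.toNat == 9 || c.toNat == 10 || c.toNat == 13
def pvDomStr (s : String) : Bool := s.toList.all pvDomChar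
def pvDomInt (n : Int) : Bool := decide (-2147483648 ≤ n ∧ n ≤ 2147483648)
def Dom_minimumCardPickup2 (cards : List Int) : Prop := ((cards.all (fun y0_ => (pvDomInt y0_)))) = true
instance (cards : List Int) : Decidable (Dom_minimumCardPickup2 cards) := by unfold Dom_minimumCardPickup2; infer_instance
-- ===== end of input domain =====

-- B replaces A's dict of last-seen positions with a per-index backward scan (alternative decomposition, no dict).

-- ===== PORT A =====
-- one iteration of A's loop: state = (card_dict, minNum), element = (i, card)
def pvStepA (st : PySem.Dict Int Int × Int) (p : Int × Int) : PySem.Dict Int Int × Int :=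
  let m := match st.1.get? p.2 with
    | some j => min st.2 (p.1 - j + 1)
    | none => st.2
  (st.1.insert p.2 p.1, m)

def minimumCardPickup2 (cards : List Int) : Int :=
  let n : Int := cards.length
  let st := (PySem.List.enumerate cards 0).foldl pvStepA (PySem.Dict.empty, n + 1)
  if st.2 = n + 1 then -1 else st.2

-- ===== PORT B =====
-- B's inner while loop: scan indices j, j-1, …, 0 for the nearest one holding c
def pvScanBack (cards : List Int) (c : Int) : Nat → Option Int
  | 0 => if cards.getD 0 0 = c then some 0 else none
  | j + 1 => if cards.getD (j + 1) 0 = c then some ((j : Int) + 1) else pvScanBack cards c j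

-- one iteration of B's outer loop: state = best (None = no pair yet), element = (i, c)
def pvStepB (cards : List Int) (best : Option Int) (p : Int × Int) : Option Int :=
  match (if p.1 = 0 then none else pvScanBack cards p.2 (p.1 - 1).toNat) with
  | some j =>
    let d := p.1 - j + 1
    match best with
    | none => some d
    | some b => some (if d < b then d else b)
  | none => best

def minimumCardPickup2_alt (cards : List Int) : Int :=
  match (PySem.List.enumerate cards 0).foldl (pvStepB cards) none with
  | none => -1
  | some b => b

-- ===== PRECONDITION & SPEC =====
def Spec_minimumCardPickup2 (cards : List Int) (out : Int) : Prop := out = minimumCardPickup2_alt cards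
instance (cards : List Int) (out : Int) : Decidable (Spec_minimumCardPickup2 cards out) := by unfold Spec_minimumCardPickup2; infer_instance

-- ===== CLAIM (what is proved, stated in full; the proofs are below) =====
def Claim_equal_minimumCardPickup2 : Prop := ∀ (cards : List Int), Dom_minimumCardPickup2 cards → Spec_minimumCardPickup2 cards (minimumCardPickup2 cards)

-- ===== LEMMAS AND PROOFS =====

-- last occurrence of c strictly before index s (none if s = 0): what A's dict stores for c
def pvPrev (cards : List Int) (c : Int) : Nat → Option Int
  | 0 => none
  | s + 1 => pvScanBack cards c s

theorem pvScanBack_bounds (cards : List Int) (c : Int) (j : Nat) (k : Int)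
    (h : pvScanBack cards c j = some k) : 0 ≤ k ∧ k ≤ (j : Int) := by
  induction j with
  | zero => simp only [pvScanBack] at h; split_ifs at h; simp_all
  | succ j ih =>
    simp only [pvScanBack] at h
    split_ifs at h with hc
    · cases h; constructor <;> omega
    · rcases ih h with ⟨h1, h2⟩; constructor <;> omega

-- the loop invariant: A's minNum mirrors B's best
theorem pvLoop_rel (cards : List Int) (suffix : List Int) (s : Nat)
    (d : PySem.Dict Int Int) (b : Option Int) (m : Int)
    (hdrop : cards.drop s = suffix)
    (hd : ∀ c, d.get? c = pvPrev cards c s)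
    (hm : match b with
      | none => m = (cards.length : Int) + 1
      | some v => m = v ∧ v ≤ (cards.length : Int)) :
    (match (PySem.List.enumerate suffix (s : Int)).foldl (pvStepB cards) b with
      | none => ((PySem.List.enumerate suffix (s : Int)).foldl pvStepA (d, m)).2
          = (cards.length : Int) + 1
      | some v => ((PySem.List.enumerate suffix (s : Int)).foldl pvStepA (d, m)).2 = v
          ∧ v ≤ (cards.length : Int)) := by
  induction suffix generalizing s d b m with
  | nil => simpa [PySem.List.enumerate_nil] using hm
  | cons x rest ih =>
    have hslt : s < cards.length := by
      have := congrArg List.length hdrop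
      simp [List.length_drop] at this
      omega
    have hx : cards[s]? = some x := by
      have := congrArg (fun l => l[0]?) hdrop
      simpa [List.getElem?_drop] using this
    have hdrop' : cards.drop (s + 1) = rest := by
      have h := congrArg List.tail hdrop
      rw [List.tail_drop] at h
      simpa using h
    have hstep : ((s : Int) + 1) = ((s + 1 : Nat) : Int) := by push_cast; ring
    -- the lookup both sides perform at index s
    have hfound : (if (s : Int) = 0 then none else pvScanBack cards x ((s : Int) - 1).toNat)
        = pvPrev cards x s := by
      cases s with
      | zero => simp [pvPrev]
      | succ k =>
        have h0 : ¬((k : Int) + 1 = 0) := by omega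
        simp [pvPrev, h0]
    -- new dict invariant
    have hd' : ∀ c, (d.insert x (s : Int)).get? c = pvPrev cards c (s + 1) := by
      intro c
      rw [PySem.Dict.get?_insert]
      by_cases hc : c = x
      · subst hc
        rw [if_pos rfl]
        cases s with
        | zero => simp [pvPrev, pvScanBack, List.getD, hx]
        | succ k => simp [pvPrev, pvScanBack, List.getD, hx]
      · rw [if_neg hc, hd c]
        cases s with
        | zero => simp [pvPrev, pvScanBack, List.getD, hx, Ne.symm hc]
        | succ k => simp [pvPrev, pvScanBack, List.getD, hx, Ne.symm hc]
    rw [PySem.List.enumerate_cons]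
    simp only [List.foldl_cons]
    rw [hstep]
    cases hprev : pvPrev cards x s with
    | none =>
      have e1 : pvStepA (d, m) ((s : Int), x) = (d.insert x (s : Int), m) := by
        simp only [pvStepA, hd x, hprev]
      have e2 : pvStepB cards b ((s : Int), x) = b := by
        simp only [pvStepB, hfound, hprev]
      rw [e1, e2]
      exact ih (s + 1) _ b m hdrop' hd' hm
    | some j =>
      have hjb : (0 : Int) ≤ j ∧ j + 1 ≤ (s : Int) := by
        cases s with
        | zero => simp [pvPrev] at hprev
        | succ k =>
          have hb := pvScanBack_bounds cards x k j (by simpa [pvPrev] using hprev)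
          push_cast
          omega
      have hdle : (s : Int) - j + 1 ≤ (cards.length : Int) := by
        have hs' : (s : Int) < (cards.length : Int) := by exact_mod_cast hslt
        omega
      have e1 : pvStepA (d, m) ((s : Int), x)
          = (d.insert x (s : Int), min m ((s : Int) - j + 1)) := by
        simp only [pvStepA, hd x, hprev]
      cases b with
      | none =>
        have hm' : m = (cards.length : Int) + 1 := hm
        have e2 : pvStepB cards none ((s : Int), x) = some ((s : Int) - j + 1) := by
          simp only [pvStepB, hfound, hprev]
        rw [e1, e2]
        apply ih (s + 1) _ _ _ hdrop' hd'
        refine ⟨?_, hdle⟩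
        rw [hm']
        exact min_eq_right (by omega)
      | some v =>
        have hm' : m = v ∧ v ≤ (cards.length : Int) := hm
        obtain ⟨h1, h2⟩ := hm'
        subst h1
        have e2 : pvStepB cards (some m) ((s : Int), x)
            = some (if (s : Int) - j + 1 < m then (s : Int) - j + 1 else m) := by
          simp only [pvStepB, hfound, hprev]
        rw [e1, e2]
        apply ih (s + 1) _ _ _ hdrop' hd'
        constructor
        · by_cases hlt : (s : Int) - j + 1 < m
          · rw [if_pos hlt]; exact min_eq_right (le_of_lt hlt)
          · rw [if_neg hlt]; exact min_eq_left (by omega)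
        · by_cases hlt : (s : Int) - j + 1 < m
          · rw [if_pos hlt]; exact hdle
          · rw [if_neg hlt]; exact h2

-- ===== VERDICT (by name: the statement is the Claim_ definition above) =====
theorem minimumCardPickup2_spec : Claim_equal_minimumCardPickup2 := by
  intro cards _
  unfold Spec_minimumCardPickup2 minimumCardPickup2 minimumCardPickup2_alt
  have h := pvLoop_rel cards cards 0 PySem.Dict.empty none ((cards.length : Int) + 1)
    (by simp) (fun c => by simp [pvPrev, PySem.Dict.get?_empty]) rfl
  simp only [Nat.cast_zero] at h
  cases hb : (PySem.List.enumerate cards 0).foldl (pvStepB cards) none with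
  | none =>
    rw [hb] at h
    simp [h]
  | some v =>
    rw [hb] at h
    obtain ⟨h1, h2⟩ := h
    simp only [h1]
    rw [if_neg (by omega)]
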